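-- pv_equiv track=rewrite | github.com/cifucarst/basic-python-course | practicas/02-comprehensions/03-dict-comprehensions/07-Ejercicio/06-scritp.py | es_contrasena_debil
-- ===== SOURCE A (Python) =====
-- import string
--
-- COMMON_PASSWORDS = {
--     "123456", "password", "qwerty", "admin", "letmein",
--     "123456789", "welcome", "monkey", "football", "iloveyou"
-- }
--
-- def es_contrasena_debil(password: str) -> bool:
--     """Verifica si una contraseña es débil según ciertos criterios."""
--     return (
--         len(password) < 8 or
--         password.lower() in COMMON_PASSWORDS or
--         password.isnumeric() or
--         password.isalpha() or
--         not any(c.islower() for c in password) or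
--         not any(c.isupper() for c in password) or
--         not any(c.isdigit() for c in password) or
--         not any(c in string.punctuation for c in password)
--     )
-- ===== SOURCE B (Python) =====
-- import string
--
-- COMMON_PASSWORDS = {
--     "123456", "password", "qwerty", "admin", "letmein",
--     "123456789", "welcome", "monkey", "football", "iloveyou"
-- }
--
-- def _clase(c):
--     """Classify a character into one exclusive class bit."""
--     if c.islower():
--         return 1
--     if c.isupper():
--         return 2
--     if c.isdigit():
--         return 4
--     if c in string.punctuation:
--         return 8
--     return 0
--
-- def es_contrasena_debil(password: str) -> bool:
--     """Fold the password into a class bitmask; strong iff all four class bits present."""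
--     mask = 0
--     for c in password:
--         mask |= _clase(c)
--     return (
--         len(password) < 8 or
--         password.lower() in COMMON_PASSWORDS or
--         password.isnumeric() or
--         password.isalpha() or
--         mask != 15
--     )
-- ===== Notes on version B (the rewrite author's own statement) =====
-- stated objective: alternative
-- what changed: A's four independent any(...) scans are replaced by folding the password into a single integer bitmask via an exclusive per-character classifier (lower=1, upper=2, digit=4, punctuation=8), and the strength test becomes the arithmetic check mask != 15.
import Mathlib
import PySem

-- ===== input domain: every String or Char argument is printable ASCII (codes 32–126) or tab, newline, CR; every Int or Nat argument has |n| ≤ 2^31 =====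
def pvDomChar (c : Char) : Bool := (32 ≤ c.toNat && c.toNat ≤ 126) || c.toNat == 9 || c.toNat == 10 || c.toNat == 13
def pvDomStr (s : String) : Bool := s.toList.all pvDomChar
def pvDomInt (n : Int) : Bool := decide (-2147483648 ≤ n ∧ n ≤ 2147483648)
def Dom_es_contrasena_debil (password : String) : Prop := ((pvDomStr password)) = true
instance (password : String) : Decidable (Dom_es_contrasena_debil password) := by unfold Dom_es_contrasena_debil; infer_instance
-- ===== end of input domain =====

-- B folds the password into one class bitmask via an exclusive classifier and tests mask != 15,
-- instead of A's four independent any(...) scans (objective: alternative).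

-- ===== PORT A =====
-- COMMON_PASSWORDS, a set literal of distinct strings
def pvCommon : PySem.Set String :=
  PySem.Set.ofList ["123456", "password", "qwerty", "admin", "letmein",
                    "123456789", "welcome", "monkey", "football", "iloveyou"]

-- string.punctuation; 'c in string.punctuation' for a single char c is membership (exact)
def pvPunct : List Char := "!\"#$%&'()*+,-./:;<=>?@[\\]^_`{|}~".toList

-- str.isnumeric is ported as strIsdigit: on the printable-ASCII domain the two agree (exact there)
def es_contrasena_debil (password : String) : Bool :=
  decide (PySem.Str.len password < 8) ||
  pvCommon.contains (PySem.Str.lower password) ||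
  PySem.Str.strIsdigit password ||
  PySem.Str.strIsalpha password ||
  !(password.toList.any (fun c => PySem.Chars.islower c)) ||
  !(password.toList.any (fun c => PySem.Chars.isupper c)) ||
  !(password.toList.any (fun c => PySem.Chars.isdigit c)) ||
  !(password.toList.any (fun c => pvPunct.contains c))

-- ===== PORT B =====
-- _clase: exclusive classification of one character into a class bit
def pvClase (c : Char) : Nat :=
  if PySem.Chars.islower c then 1
  else if PySem.Chars.isupper c then 2
  else if PySem.Chars.isdigit c then 4
  else if pvPunct.contains c then 8
  else 0

def es_contrasena_debil_alt (password : String) : Bool :=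
  let mask := password.toList.foldl (fun m c => m ||| pvClase c) 0
  decide (PySem.Str.len password < 8) ||
  pvCommon.contains (PySem.Str.lower password) ||
  PySem.Str.strIsdigit password ||
  PySem.Str.strIsalpha password ||
  decide (mask ≠ 15)

-- ===== PRECONDITION & SPEC =====
def Spec_es_contrasena_debil (password : String) (out : Bool) : Prop := out = es_contrasena_debil_alt password
instance (password : String) (out : Bool) : Decidable (Spec_es_contrasena_debil password out) := by unfold Spec_es_contrasena_debil; infer_instance

-- ===== CLAIM (what is proved, stated in full; the proofs are below) =====
def Claim_equal_es_contrasena_debil : Prop := ∀ (password : String), Dom_es_contrasena_debil password → Spec_es_contrasena_debil password (es_contrasena_debil password)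

-- ===== LEMMAS AND PROOFS =====
-- the bitmask encoding of four class-presence flags
def pvEnc (a b c d : Bool) : Nat :=
  (if a then 1 else 0) ||| (if b then 2 else 0) ||| (if c then 4 else 0) ||| (if d then 8 else 0)

-- a punctuation character is not a lowercase letter, uppercase letter or digit
theorem pvPunct_all :
    pvPunct.all (fun c => !PySem.Chars.islower c && !PySem.Chars.isupper c && !PySem.Chars.isdigit c) = true := by
  decide

theorem pvPunct_disjoint (c : Char) (h : pvPunct.contains c = true) :
    PySem.Chars.islower c = false ∧ PySem.Chars.isupper c = false ∧ PySem.Chars.isdigit c = false := by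
  have hm : c ∈ pvPunct := by simpa using h
  have hc := List.all_eq_true.mp pvPunct_all c hm
  simp only [Bool.and_eq_true, Bool.not_eq_true'] at hc
  exact ⟨hc.1.1, hc.1.2, hc.2⟩

-- character codes of the range endpoints, for omega
theorem pvChtn : ('a'.toNat = 97) ∧ ('z'.toNat = 122) ∧ ('A'.toNat = 65) ∧ ('Z'.toNat = 90) ∧ ('0'.toNat = 48) ∧ ('9'.toNat = 57) := by decide

-- the character classes are pairwise disjoint
theorem pvLower_not (c : Char) (h : PySem.Chars.islower c = true) :
    PySem.Chars.isupper c = false ∧ PySem.Chars.isdigit c = false ∧ pvPunct.contains c = false := by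
  refine ⟨?_, ?_, ?_⟩
  · simp only [PySem.Chars.islower, PySem.Chars.isupper, Bool.and_eq_true, decide_eq_true_eq, Char.le_def, UInt32.le_iff_toNat_le] at h ⊢
    simp only [Bool.and_eq_false_iff, decide_eq_false_iff_not]
    norm_num at h ⊢
    simp only [pvChtn.1, pvChtn.2.1, pvChtn.2.2.1, pvChtn.2.2.2.1] at h ⊢
    omega
  · simp only [PySem.Chars.islower, PySem.Chars.isdigit, Bool.and_eq_true, decide_eq_true_eq, Char.le_def, UInt32.le_iff_toNat_le] at h ⊢
    simp only [Bool.and_eq_false_iff, decide_eq_false_iff_not]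
    norm_num at h ⊢
    simp only [pvChtn.1, pvChtn.2.1, pvChtn.2.2.2.2.1, pvChtn.2.2.2.2.2] at h ⊢
    omega
  · by_contra hp
    exact absurd h (by simpa using (pvPunct_disjoint c (by simpa using hp)).1)

theorem pvUpper_not (c : Char) (h : PySem.Chars.isupper c = true) :
    PySem.Chars.isdigit c = false ∧ pvPunct.contains c = false := by
  refine ⟨?_, ?_⟩
  · simp only [PySem.Chars.isupper, PySem.Chars.isdigit, Bool.and_eq_true, decide_eq_true_eq, Char.le_def, UInt32.le_iff_toNat_le] at h ⊢
    simp only [Bool.and_eq_false_iff, decide_eq_false_iff_not]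
    norm_num at h ⊢
    simp only [pvChtn.2.2.1, pvChtn.2.2.2.1, pvChtn.2.2.2.2.1, pvChtn.2.2.2.2.2] at h ⊢
    omega
  · by_contra hp
    exact absurd h (by simpa using (pvPunct_disjoint c (by simpa using hp)).2.1)

theorem pvDigit_not (c : Char) (h : PySem.Chars.isdigit c = true) :
    pvPunct.contains c = false := by
  by_contra hp
  exact absurd h (by simpa using (pvPunct_disjoint c (by simpa using hp)).2.2)

-- the mask fold computes the bitmask encoding of the four any-scans
theorem pvMask_foldl (cs : List Char) (m : Nat) :
    cs.foldl (fun m c => m ||| pvClase c) m =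
      m ||| pvEnc (cs.any (fun c => PySem.Chars.islower c))
                  (cs.any (fun c => PySem.Chars.isupper c))
                  (cs.any (fun c => PySem.Chars.isdigit c))
                  (cs.any (fun c => pvPunct.contains c)) := by
  induction cs generalizing m with
  | nil => simp [pvEnc]
  | cons c cs ih =>
    simp only [List.foldl_cons, List.any_cons, ih, Nat.or_assoc]
    congr 1
    unfold pvClase
    by_cases hl : PySem.Chars.islower c = true
    · obtain ⟨h1, h2, h3⟩ := pvLower_not c hl
      simp only [hl, h1, h2, h3, if_true, Bool.true_or, Bool.false_or]
      cases cs.any (fun c => PySem.Chars.islower c) <;>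
        cases cs.any (fun c => PySem.Chars.isupper c) <;>
        cases cs.any (fun c => PySem.Chars.isdigit c) <;>
        cases cs.any (fun c => pvPunct.contains c) <;> simp [pvEnc]
    · rw [Bool.not_eq_true] at hl
      simp only [hl, if_false, Bool.false_or]
      by_cases hu : PySem.Chars.isupper c = true
      · obtain ⟨h2, h3⟩ := pvUpper_not c hu
        simp only [hu, h2, h3, if_true, Bool.true_or, Bool.false_or]
        cases cs.any (fun c => PySem.Chars.islower c) <;>
          cases cs.any (fun c => PySem.Chars.isupper c) <;>
          cases cs.any (fun c => PySem.Chars.isdigit c) <;>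
          cases cs.any (fun c => pvPunct.contains c) <;> simp [pvEnc]
      · rw [Bool.not_eq_true] at hu
        simp only [hu, if_false, Bool.false_or]
        by_cases hd : PySem.Chars.isdigit c = true
        · have h3 := pvDigit_not c hd
          simp only [hd, h3, if_true, Bool.true_or, Bool.false_or]
          cases cs.any (fun c => PySem.Chars.islower c) <;>
            cases cs.any (fun c => PySem.Chars.isupper c) <;>
            cases cs.any (fun c => PySem.Chars.isdigit c) <;>
            cases cs.any (fun c => pvPunct.contains c) <;> simp [pvEnc]
        · rw [Bool.not_eq_true] at hd
          simp only [hd, if_false, Bool.false_or]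
          by_cases hp : pvPunct.contains c = true
          · simp only [hp, if_true, Bool.true_or]
            cases cs.any (fun c => PySem.Chars.islower c) <;>
              cases cs.any (fun c => PySem.Chars.isupper c) <;>
              cases cs.any (fun c => PySem.Chars.isdigit c) <;>
              cases cs.any (fun c => pvPunct.contains c) <;> simp [pvEnc]
          · rw [Bool.not_eq_true] at hp
            simp only [hp, Bool.false_eq_true, if_false, Nat.zero_or, Bool.false_or]

-- ===== VERDICT (by name: the statement is the Claim_ definition above) =====
theorem es_contrasena_debil_spec : Claim_equal_es_contrasena_debil := by
  intro password _
  unfold Spec_es_contrasena_debil es_contrasena_debil es_contrasena_debil_alt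
  rw [pvMask_foldl]
  cases password.toList.any (fun c => PySem.Chars.islower c) <;>
    cases password.toList.any (fun c => PySem.Chars.isupper c) <;>
    cases password.toList.any (fun c => PySem.Chars.isdigit c) <;>
    cases password.toList.any (fun c => pvPunct.contains c) <;>
    simp [pvEnc]
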